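-- pv_equiv track=rewrite | github.com/abundis-rmn2/HopeisHope | pfsi_processing/pfsi_make_stoplist_tattoos.py | categorize_words
-- ===== SOURCE A (Python) =====
-- def categorize_words(word_counts, keywords):
--     word_categories = {}
--     for category, words in keywords.items():
--         word_categories[category] = {}
--         for word, count in word_counts.items():
--             if word in words:
--                 word_categories[category][word] = count
--     return word_categories
-- ===== SOURCE B (Python) =====
-- def categorize_words(word_counts, keywords):
--     # Inverted index word -> list of categories (in keywords order),
--     # then a single pass over word_counts, appending each word to every
--     # category that lists it.  O(total keyword words + words) instead of
--     # O(categories * words * category size).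
--     result = {category: [] for category in keywords}
--     index = {}
--     for category, words in keywords.items():
--         for w in words:
--             cats = index.setdefault(w, [])
--             if category not in cats:
--                 cats.append(category)
--     for word, count in word_counts.items():
--         for category in index.get(word, []):
--             result[category].append((word, count))
--     return {category: dict(pairs) for category, pairs in result.items()}
-- ===== Notes on version B (the rewrite author's own statement) =====
-- stated objective: faster
-- what changed: Replaces A's nested scan (for each category, scan all word_counts and test list membership in that category's word list) by an inverted word-to-categories index built once, then a single ordered pass over word_counts appending each word to exactly the categories that list it.
import Mathlib
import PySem

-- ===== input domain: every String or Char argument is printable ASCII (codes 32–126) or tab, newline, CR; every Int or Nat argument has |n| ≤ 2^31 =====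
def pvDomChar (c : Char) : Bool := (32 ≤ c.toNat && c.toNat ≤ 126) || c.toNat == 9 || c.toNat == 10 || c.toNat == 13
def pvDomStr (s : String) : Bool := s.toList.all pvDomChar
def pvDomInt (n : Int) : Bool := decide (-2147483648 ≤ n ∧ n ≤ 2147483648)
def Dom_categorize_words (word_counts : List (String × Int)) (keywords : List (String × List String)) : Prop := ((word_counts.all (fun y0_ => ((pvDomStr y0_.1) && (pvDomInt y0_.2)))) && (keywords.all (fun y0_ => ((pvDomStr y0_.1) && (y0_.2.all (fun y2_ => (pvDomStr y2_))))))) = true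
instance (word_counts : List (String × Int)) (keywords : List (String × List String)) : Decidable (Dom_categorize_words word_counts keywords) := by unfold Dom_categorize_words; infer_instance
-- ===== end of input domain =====

-- B replaces A's categories × words membership scan by an inverted word→categories
-- index and one pass over word_counts (objective: faster, asymptotically).

-- ===== PORT A =====
-- literal transliteration: for each category build its inner dict by scanning word_counts
def categorize_words (word_counts : List (String × Int)) (keywords : List (String × List String)) : List (String × List (String × Int)) :=
  let word_categories : PySem.Dict String (PySem.Dict String Int) :=
    keywords.foldl (fun d c =>
      d.insert c.1
        (word_counts.foldl (fun inner p =>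
          if c.2.contains p.1 then inner.insert p.1 p.2 else inner) PySem.Dict.empty))
      PySem.Dict.empty
  word_categories.items.map (fun p => (p.1, p.2.items))

-- ===== PORT B =====
-- Source B: result initialised per category, inverted index word→categories, one pass over word_counts
def categorize_words_alt (word_counts : List (String × Int)) (keywords : List (String × List String)) : List (String × List (String × Int)) :=
  let result : PySem.Dict String (List (String × Int)) :=
    keywords.foldl (fun d c => d.insert c.1 []) PySem.Dict.empty
  let index : PySem.Dict String (List String) :=
    keywords.foldl (fun d c =>
      c.2.foldl (fun d w =>
        let cats := d.getD w []
        if cats.contains c.1 then d else d.insert w (cats ++ [c.1])) d)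
      PySem.Dict.empty
  let result :=
    word_counts.foldl (fun res p =>
      (index.getD p.1 []).foldl (fun res cat =>
        -- res[cat].append(p): cat is always a key of res, so modify with default [] is exact
        res.modify cat [] (fun l => l ++ [(p.1, p.2)])) res)
      result
  result.items.map (fun p => (p.1, (PySem.Dict.ofList p.2).items))

-- ===== PRECONDITION & SPEC =====
-- word_counts and keywords port Python dicts, whose keys are distinct; the assoc lists
-- with duplicate keys correspond to no Python input, so Pre_ requires distinct keys.
def Pre_categorize_words (word_counts : List (String × Int)) (keywords : List (String × List String)) : Prop :=
  (word_counts.map Prod.fst).Nodup ∧ (keywords.map Prod.fst).Nodup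
instance (word_counts : List (String × Int)) (keywords : List (String × List String)) : Decidable (Pre_categorize_words word_counts keywords) := by unfold Pre_categorize_words; infer_instance
def pvWitness_categorize_words : (List (String × Int)) × (List (String × List String)) :=
  ([("ab", 3), ("cd", 1)], [("X", ["ab", "zz"]), ("Y", ["cd", "ab"])])
def Spec_categorize_words (word_counts : List (String × Int)) (keywords : List (String × List String)) (out : List (String × List (String × Int))) : Prop := out = categorize_words_alt word_counts keywords
instance (word_counts : List (String × Int)) (keywords : List (String × List String)) (out : List (String × List (String × Int))) : Decidable (Spec_categorize_words word_counts keywords out) := by unfold Spec_categorize_words; infer_instance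

-- ===== CLAIM (what is proved, stated in full; the proofs are below) =====
def Claim_equal_categorize_words : Prop := ∀ (word_counts : List (String × Int)) (keywords : List (String × List String)), Dom_categorize_words word_counts keywords → Pre_categorize_words word_counts keywords → Spec_categorize_words word_counts keywords (categorize_words word_counts keywords)

-- ===== LEMMAS AND PROOFS =====

-- Both sides equal this canonical value.
def cwTarget (word_counts : List (String × Int)) (keywords : List (String × List String)) : List (String × List (String × Int)) :=
  keywords.map (fun c => (c.1, word_counts.filter (fun p => c.2.contains p.1)))

-- ---- A-side ----

-- folding conditional inserts of distinct fresh keys appends the filtered pairs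
lemma cw_items_filter_insert {ν : Type} (l : List (String × ν)) (P : String × ν → Bool)
    (hnd : (l.map Prod.fst).Nodup) :
    (l.foldl (fun d p => if P p then d.insert p.1 p.2 else d) (PySem.Dict.empty : PySem.Dict String ν)).items
      = l.filter P := by
  rw [← List.foldl_filter]
  have hnd' : ((l.filter P).map (fun a => a.1)).Nodup :=
    List.Nodup.sublist (List.Sublist.map _ List.filter_sublist) hnd
  have := PySem.Dict.items_foldl_insert_fresh (l.filter P) (fun a => a.1) (fun a => a.2)
    (PySem.Dict.empty : PySem.Dict String ν) (by intro a _; simp) hnd'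
  simpa using this

lemma cw_A_eq_target (word_counts : List (String × Int)) (keywords : List (String × List String))
    (hwc : (word_counts.map Prod.fst).Nodup) (hkw : (keywords.map Prod.fst).Nodup) :
    categorize_words word_counts keywords = cwTarget word_counts keywords := by
  simp only [categorize_words]
  rw [PySem.Dict.items_foldl_insert_fresh keywords (fun c => c.1)
      (fun c => word_counts.foldl (fun inner p => if c.2.contains p.1 then inner.insert p.1 p.2 else inner) PySem.Dict.empty)
      PySem.Dict.empty (fun a _ => by simp) hkw]
  simp only [show (PySem.Dict.empty : PySem.Dict String (PySem.Dict String Int)).items = [] from rfl,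
    List.nil_append, List.map_map, cwTarget]
  apply List.map_congr_left
  intro c _
  exact congrArg (fun l => (c.1, l)) (cw_items_filter_insert word_counts (fun p => c.2.contains p.1) hwc)

-- ---- B-side ----

-- the per-category step of the index construction
def cwIdxStep (a : String) (d : PySem.Dict String (List String)) (w : String) : PySem.Dict String (List String) :=
  let cats := d.getD w []
  if cats.contains a then d else d.insert w (cats ++ [a])

lemma cw_idx_inner (a w : String) (ws : List String) (d : PySem.Dict String (List String)) :
    (ws.foldl (cwIdxStep a) d).getD w []
      = if a ∈ d.getD w [] ∨ w ∉ ws then d.getD w [] else d.getD w [] ++ [a] := by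
  induction ws generalizing d with
  | nil => simp
  | cons u us ih =>
    rw [List.foldl_cons, ih]
    by_cases hau : a ∈ d.getD u []
    · have h1 : cwIdxStep a d u = d := by simp [cwIdxStep, hau]
      rw [h1]
      by_cases hwu : w = u
      · subst hwu; simp [hau]
      · by_cases haw : a ∈ d.getD w []
        · simp [haw]
        · simp [haw, hwu]
    · have h1 : cwIdxStep a d u = d.insert u (d.getD u [] ++ [a]) := by simp [cwIdxStep, hau]
      rw [h1]
      by_cases hwu : w = u
      · subst hwu
        have hg : (d.insert w (d.getD w [] ++ [a])).getD w [] = d.getD w [] ++ [a] := by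
          simp
        rw [hg]; simp [hau]
      · have hg : (d.insert u (d.getD u [] ++ [a])).getD w [] = d.getD w [] := by
          simp [PySem.Dict.getD_insert, hwu]
        rw [hg]; simp [hwu]

lemma cw_idx_outer (w : String) (kws : List (String × List String)) (d : PySem.Dict String (List String))
    (hnd : (kws.map Prod.fst).Nodup) (hd : ∀ c ∈ kws, c.1 ∉ d.getD w []) :
    (kws.foldl (fun d c => c.2.foldl (cwIdxStep c.1) d) d).getD w []
      = d.getD w [] ++ (kws.filter (fun c => c.2.contains w)).map Prod.fst := by
  induction kws generalizing d with
  | nil => simp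
  | cons c cs ih =>
    rw [List.foldl_cons]
    have hc : c.1 ∉ d.getD w [] := hd c (by simp)
    have h1 : (c.2.foldl (cwIdxStep c.1) d).getD w []
        = d.getD w [] ++ (if c.2.contains w then [c.1] else []) := by
      rw [cw_idx_inner]
      by_cases hw : w ∈ c.2
      · simp [hw, hc]
      · simp [hw]
    have hnd' : (cs.map Prod.fst).Nodup := (List.nodup_cons.mp hnd).2
    have hd' : ∀ c' ∈ cs, c'.1 ∉ (c.2.foldl (cwIdxStep c.1) d).getD w [] := by
      intro c' hc'
      rw [h1]
      simp only [List.mem_append]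
      rintro (h | h)
      · exact hd c' (List.mem_cons_of_mem _ hc') h
      · have : c'.1 = c.1 := by
          simp at h
          tauto
        exact (List.nodup_cons.mp hnd).1 (this ▸ List.mem_map_of_mem hc')
    rw [ih _ hnd' hd', h1]
    by_cases hw : w ∈ c.2 <;> simp [hw, List.filter_cons, List.append_assoc]

-- modifying along a nodup list of keys appends to exactly the listed entries
lemma cw_mod_fold (cats : List String) (hnd : cats.Nodup) (r : PySem.Dict String (List (String × Int)))
    (x : String × Int) (a : String) :
    (cats.foldl (fun r c => r.modify c [] (fun l => l ++ [x])) r).getD a []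
      = r.getD a [] ++ (if a ∈ cats then [x] else []) := by
  induction cats generalizing r with
  | nil => simp
  | cons c cs ih =>
    rw [List.foldl_cons, ih (List.nodup_cons.mp hnd).2]
    by_cases hac : a = c
    · subst hac
      have hnotin : a ∉ cs := (List.nodup_cons.mp hnd).1
      simp [hnotin]
    · simp [PySem.Dict.getD_modify, hac]

lemma cw_mod_fold_keys (cats : List String) (r : PySem.Dict String (List (String × Int)))
    (x : String × Int) (h : ∀ c ∈ cats, r.contains c = true) :
    (cats.foldl (fun r c => r.modify c [] (fun l => l ++ [x])) r).keys = r.keys := by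
  induction cats generalizing r with
  | nil => rfl
  | cons c cs ih =>
    rw [List.foldl_cons]
    have hc : r.contains c = true := h c (by simp)
    have hkeys : (r.modify c [] (fun l => l ++ [x])).keys = r.keys := by
      rw [PySem.Dict.keys_modify, PySem.Dict.keys_insert_of_contains]
      exact hc
    have hcont : ∀ c' ∈ cs, (r.modify c [] (fun l => l ++ [x])).contains c' = true := by
      intro c' hc'
      have hm := h c' (List.mem_cons_of_mem _ hc')
      rw [PySem.Dict.contains_eq_decide_mem_keys] at hm ⊢
      rw [hkeys]; exact hm
    rw [ih _ hcont, hkeys]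

lemma cw_B_eq_target (word_counts : List (String × Int)) (keywords : List (String × List String))
    (hwc : (word_counts.map Prod.fst).Nodup) (hkw : (keywords.map Prod.fst).Nodup) :
    categorize_words_alt word_counts keywords = cwTarget word_counts keywords := by
  show (List.foldl
      (fun res p =>
        ((keywords.foldl (fun d c => c.2.foldl (cwIdxStep c.1) d) PySem.Dict.empty).getD p.1 []).foldl
          (fun res cat => res.modify cat [] (fun l => l ++ [(p.1, p.2)])) res)
      (keywords.foldl (fun d c => d.insert c.1 ([] : List (String × Int))) PySem.Dict.empty)
      word_counts).items.map (fun p => (p.1, (PySem.Dict.ofList p.2).items))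
    = cwTarget word_counts keywords
  set idx := keywords.foldl (fun d c => c.2.foldl (cwIdxStep c.1) d) PySem.Dict.empty with hidxdef
  set base := keywords.foldl (fun d c => d.insert c.1 ([] : List (String × Int))) PySem.Dict.empty with hbasedef
  have hbase_items : base.items = keywords.map (fun c => (c.1, ([] : List (String × Int)))) := by
    rw [hbasedef]
    simpa using PySem.Dict.items_foldl_insert_fresh keywords (fun c => c.1)
      (fun _ => ([] : List (String × Int))) PySem.Dict.empty (fun a _ => by simp) hkw
  have hbase_keys : base.keys = keywords.map Prod.fst := by
    have : base.keys = base.items.map Prod.fst := rfl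
    rw [this, hbase_items, List.map_map]
    simp
  have hbase_nodup : base.keys.Nodup := by rw [hbase_keys]; exact hkw
  have hbase_getD : ∀ k, base.getD k [] = [] := by
    intro k
    by_cases hk : k ∈ keywords.map Prod.fst
    · obtain ⟨c, hc, rfl⟩ := List.mem_map.mp hk
      refine PySem.Dict.getD_of_mem_items base ?_ hbase_nodup []
      rw [hbase_items]
      exact List.mem_map_of_mem hc
    · refine PySem.Dict.getD_of_not_contains base [] ?_
      rw [PySem.Dict.contains_eq_decide_mem_keys, hbase_keys]
      simpa using hk
  have hidx : ∀ w, idx.getD w [] = (keywords.filter (fun c => c.2.contains w)).map Prod.fst := by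
    intro w
    rw [hidxdef, cw_idx_outer w keywords PySem.Dict.empty hkw (by simp)]
    simp
  have hidx_sub : ∀ w k, k ∈ idx.getD w [] → k ∈ keywords.map Prod.fst := by
    intro w k hkmem
    rw [hidx] at hkmem
    obtain ⟨c, hc, rfl⟩ := List.mem_map.mp hkmem
    exact List.mem_map_of_mem (List.mem_of_mem_filter hc)
  have hidx_nodup : ∀ w, (idx.getD w []).Nodup := by
    intro w
    rw [hidx]
    exact List.Nodup.sublist (List.Sublist.map _ List.filter_sublist) hkw
  -- keys are preserved by the single pass
  have hkeys : ∀ (l : List (String × Int)) (r : PySem.Dict String (List (String × Int))),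
      r.keys = keywords.map Prod.fst →
      (l.foldl (fun res p => ((idx.getD p.1 []).foldl
          (fun res cat => res.modify cat [] (fun l => l ++ [(p.1, p.2)])) res)) r).keys
        = keywords.map Prod.fst := by
    intro l
    induction l with
    | nil => intro r h; exact h
    | cons p ps ih =>
      intro r h
      rw [List.foldl_cons]
      apply ih
      rw [cw_mod_fold_keys _ _ _ ?_, h]
      intro c hcmem
      rw [PySem.Dict.contains_eq_decide_mem_keys, h]
      simpa using hidx_sub p.1 c hcmem
  -- per-key value after the single pass
  have hval : ∀ (l : List (String × Int)) (r : PySem.Dict String (List (String × Int))) (a : String),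
      (l.foldl (fun res p => ((idx.getD p.1 []).foldl
          (fun res cat => res.modify cat [] (fun l => l ++ [(p.1, p.2)])) res)) r).getD a []
        = r.getD a [] ++ l.filter (fun p => (idx.getD p.1 []).contains a) := by
    intro l
    induction l with
    | nil => intro r a; simp
    | cons p ps ih =>
      intro r a
      rw [List.foldl_cons, ih, cw_mod_fold _ (hidx_nodup p.1)]
      by_cases hmem : a ∈ idx.getD p.1 []
      · simp [hmem, List.append_assoc]
      · simp [hmem]
  set fin := List.foldl
      (fun res p => ((idx.getD p.1 []).foldl
        (fun res cat => res.modify cat [] (fun l => l ++ [(p.1, p.2)])) res))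
      base word_counts with hfindef
  have hfin_keys : fin.keys = keywords.map Prod.fst := hkeys word_counts base hbase_keys
  have hfin_items : fin.items = fin.keys.map (fun k => (k, fin.getD k [])) :=
    PySem.Dict.items_eq_map_keys fin (by rw [hfin_keys]; exact hkw) []
  rw [hfin_items, hfin_keys, List.map_map, List.map_map, cwTarget]
  apply List.map_congr_left
  intro c hc
  have hv : fin.getD c.1 [] = word_counts.filter (fun p => (idx.getD p.1 []).contains c.1) := by
    rw [hfindef, hval, hbase_getD]
    simp
  have hpred : ∀ p : String × Int, (idx.getD p.1 []).contains c.1 = c.2.contains p.1 := by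
    intro p
    rw [hidx]
    by_cases hw : c.2.contains p.1 = true
    · have hm : c.1 ∈ ((keywords.filter (fun c' => c'.2.contains p.1)).map Prod.fst) :=
        List.mem_map_of_mem (List.mem_filter.mpr ⟨hc, hw⟩)
      rw [hw]
      simpa using hm
    · have hm : c.1 ∉ ((keywords.filter (fun c' => c'.2.contains p.1)).map Prod.fst) := by
        intro hmem
        obtain ⟨c', hc', he⟩ := List.mem_map.mp hmem
        have hcc : c' = c := List.inj_on_of_nodup_map hkw (List.mem_of_mem_filter hc') hc he
        subst hcc
        exact hw (List.mem_filter.mp hc').2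
      rw [Bool.eq_false_iff.mpr hw]
      simpa using hm
  have hfilter : word_counts.filter (fun p => (idx.getD p.1 []).contains c.1)
      = word_counts.filter (fun p => c.2.contains p.1) := by
    apply List.filter_congr
    intro p _
    exact hpred p
  have hnodup_val : ((word_counts.filter (fun p => c.2.contains p.1)).map Prod.fst).Nodup :=
    List.Nodup.sublist (List.Sublist.map _ List.filter_sublist) hwc
  have hof : (PySem.Dict.ofList (word_counts.filter (fun p => c.2.contains p.1))).items
      = word_counts.filter (fun p => c.2.contains p.1) := by
    have hrfl : PySem.Dict.ofList (word_counts.filter (fun p => c.2.contains p.1))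
        = (word_counts.filter (fun p => c.2.contains p.1)).foldl
            (fun d p => d.insert p.1 p.2) PySem.Dict.empty := rfl
    rw [hrfl]
    simpa using PySem.Dict.items_foldl_insert_fresh (word_counts.filter (fun p => c.2.contains p.1))
      (fun p => p.1) (fun p => p.2) PySem.Dict.empty (fun a _ => by simp) hnodup_val
  simp only [Function.comp_apply]
  rw [hv, hfilter, hof]

-- ===== VERDICT (by name: the statement is the Claim_ definition above) =====
theorem categorize_words_spec : Claim_equal_categorize_words := by
  intro wc kw _hdom hpre
  unfold Spec_categorize_words
  rw [cw_A_eq_target wc kw hpre.1 hpre.2, cw_B_eq_target wc kw hpre.1 hpre.2]
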